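-- pv_equiv track=rewrite | github.com/nkanderson/ECE510-challenges | challenge-5/bytecode_analysis.py | categorize_instructions
-- ===== SOURCE A (Python) =====
-- from collections import defaultdict
--
-- INSTRUCTION_CATEGORIES = {
--     "Arithmetic": {"BINARY_OP", "UNARY_OP"},
--     "Control Flow": {
--         "JUMP_FORWARD",
--         "JUMP_BACKWARD",
--         "POP_JUMP_FORWARD_IF_TRUE",
--         "POP_JUMP_FORWARD_IF_FALSE",
--         "POP_JUMP_BACKWARD_IF_TRUE",
--         "POP_JUMP_BACKWARD_IF_FALSE",
--         "JUMP_IF_TRUE_OR_POP",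
--         "JUMP_IF_FALSE_OR_POP",
--         "RETURN_VALUE",
--     },
--     "Function Calls": {
--         "CALL",
--         "PRECALL",
--         "CALL_FUNCTION",
--         "CALL_METHOD",
--         "CALL_FUNCTION_KW",
--         "CALL_FUNCTION_EX",
--     },
--     "Load/Store": {
--         "LOAD_FAST",
--         "STORE_FAST",
--         "LOAD_GLOBAL",
--         "STORE_GLOBAL",
--         "LOAD_CONST",
--         "LOAD_NAME",
--         "STORE_NAME",
--         "LOAD_ATTR",
--         "STORE_ATTR",
--         "LOAD_DEREF",
--         "STORE_DEREF",
--     },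
--     "Other": set(),  # Catch-all
-- }
--
-- def categorize_instructions(op_counts):
--     """
--     Groups instruction counts into defined categories.
--
--     Args:
--         op_counts: Dict[str, int] of individual opcode counts.
--
--     Returns:
--         Dict[str, int] of category counts.
--     """
--     category_counts = defaultdict(int)
--     for opname, count in op_counts.items():
--         placed = False
--         for category, ops in INSTRUCTION_CATEGORIES.items():
--             if opname in ops:
--                 category_counts[category] += count
--                 placed = True
--                 break
--         if not placed:
--             category_counts["Other"] += count
--     return dict(category_counts)
-- ===== SOURCE B (Python) =====
-- from collections import defaultdict
--
-- INSTRUCTION_CATEGORIES = {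
--     "Arithmetic": {"BINARY_OP", "UNARY_OP"},
--     "Control Flow": {
--         "JUMP_FORWARD",
--         "JUMP_BACKWARD",
--         "POP_JUMP_FORWARD_IF_TRUE",
--         "POP_JUMP_FORWARD_IF_FALSE",
--         "POP_JUMP_BACKWARD_IF_TRUE",
--         "POP_JUMP_BACKWARD_IF_FALSE",
--         "JUMP_IF_TRUE_OR_POP",
--         "JUMP_IF_FALSE_OR_POP",
--         "RETURN_VALUE",
--     },
--     "Function Calls": {
--         "CALL",
--         "PRECALL",
--         "CALL_FUNCTION",
--         "CALL_METHOD",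
--         "CALL_FUNCTION_KW",
--         "CALL_FUNCTION_EX",
--     },
--     "Load/Store": {
--         "LOAD_FAST",
--         "STORE_FAST",
--         "LOAD_GLOBAL",
--         "STORE_GLOBAL",
--         "LOAD_CONST",
--         "LOAD_NAME",
--         "STORE_NAME",
--         "LOAD_ATTR",
--         "STORE_ATTR",
--         "LOAD_DEREF",
--         "STORE_DEREF",
--     },
--     "Other": set(),  # Catch-all
-- }
--
-- def categorize_instructions(op_counts):
--     """Groups instruction counts into defined categories via a reverse-lookup table."""
--     lookup = {}
--     for category, ops in INSTRUCTION_CATEGORIES.items():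
--         for op in ops:
--             lookup[op] = category
--     category_counts = defaultdict(int)
--     for opname, count in op_counts.items():
--         category_counts[lookup.get(opname, "Other")] += count
--     return dict(category_counts)
-- ===== Notes on version B (the rewrite author's own statement) =====
-- stated objective: simpler
-- what changed: Builds a reverse-lookup table opname->category once from INSTRUCTION_CATEGORIES, then accumulates counts in one pass with lookup.get(opname, 'Other'), removing the per-opname inner scan over the five categories and the placed/break flag.
import Mathlib
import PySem

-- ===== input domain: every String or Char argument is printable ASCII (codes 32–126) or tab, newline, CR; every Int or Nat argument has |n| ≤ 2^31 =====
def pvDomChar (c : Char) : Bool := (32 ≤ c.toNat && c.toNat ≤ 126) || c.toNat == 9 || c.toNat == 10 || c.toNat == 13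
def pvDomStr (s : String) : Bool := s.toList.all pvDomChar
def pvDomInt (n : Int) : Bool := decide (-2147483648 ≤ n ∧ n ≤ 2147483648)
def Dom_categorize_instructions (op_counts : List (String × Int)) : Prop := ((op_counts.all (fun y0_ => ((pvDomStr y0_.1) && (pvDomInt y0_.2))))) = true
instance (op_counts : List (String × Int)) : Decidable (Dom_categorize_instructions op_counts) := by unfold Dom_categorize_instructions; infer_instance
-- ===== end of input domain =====

-- B replaces A's per-opname inner scan over the five category sets (with a placed/break flag)
-- by a reverse-lookup table built once, then a single accumulating pass; objective: simpler.


-- INSTRUCTION_CATEGORIES: module-level constant shared by A and B (dict of category → set of opnames)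
def INSTRUCTION_CATEGORIES : List (String × List String) :=
  [("Arithmetic", ["BINARY_OP", "UNARY_OP"]),
   ("Control Flow",
     ["JUMP_FORWARD", "JUMP_BACKWARD", "POP_JUMP_FORWARD_IF_TRUE", "POP_JUMP_FORWARD_IF_FALSE",
      "POP_JUMP_BACKWARD_IF_TRUE", "POP_JUMP_BACKWARD_IF_FALSE", "JUMP_IF_TRUE_OR_POP",
      "JUMP_IF_FALSE_OR_POP", "RETURN_VALUE"]),
   ("Function Calls",
     ["CALL", "PRECALL", "CALL_FUNCTION", "CALL_METHOD", "CALL_FUNCTION_KW", "CALL_FUNCTION_EX"]),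
   ("Load/Store",
     ["LOAD_FAST", "STORE_FAST", "LOAD_GLOBAL", "STORE_GLOBAL", "LOAD_CONST", "LOAD_NAME",
      "STORE_NAME", "LOAD_ATTR", "STORE_ATTR", "LOAD_DEREF", "STORE_DEREF"]),
   ("Other", [])]

-- ===== PORT A =====
-- A's inner 'for category, ops in …: if opname in ops: …; break' with the placed flag:
-- the [] case is the 'if not placed' branch.
def pvPlaceA (d : PySem.Dict String Int) (opname : String) (count : Int) :
    List (String × List String) → PySem.Dict String Int
  | [] => d.modify "Other" 0 (· + count)
  | (category, ops) :: rest =>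
      if ops.contains opname then d.modify category 0 (· + count)
      else pvPlaceA d opname count rest

def categorize_instructions (op_counts : List (String × Int)) : List (String × Int) :=
  (op_counts.foldl (fun d p => pvPlaceA d p.1 p.2 INSTRUCTION_CATEGORIES) PySem.Dict.empty).items

-- ===== PORT B =====
def categorize_instructions_alt (op_counts : List (String × Int)) : List (String × Int) :=
  let lookup : PySem.Dict String String :=
    INSTRUCTION_CATEGORIES.foldl
      (fun acc p => p.2.foldl (fun a op => a.insert op p.1) acc) PySem.Dict.empty
  (op_counts.foldl (fun d p => d.modify (lookup.getD p.1 "Other") 0 (· + p.2))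
    PySem.Dict.empty).items

-- ===== PRECONDITION & SPEC =====
def Spec_categorize_instructions (op_counts : List (String × Int)) (out : List (String × Int)) : Prop := out = categorize_instructions_alt op_counts
instance (op_counts : List (String × Int)) (out : List (String × Int)) : Decidable (Spec_categorize_instructions op_counts out) := by unfold Spec_categorize_instructions; infer_instance

-- ===== CLAIM (what is proved, stated in full; the proofs are below) =====
def Claim_equal_categorize_instructions : Prop := ∀ (op_counts : List (String × Int)), Dom_categorize_instructions op_counts → Spec_categorize_instructions op_counts (categorize_instructions op_counts)

-- ===== LEMMAS AND PROOFS =====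

-- B's reverse-lookup table, evaluated to a literal dict
lemma pvLookup_eval :
    INSTRUCTION_CATEGORIES.foldl
      (fun acc p => p.2.foldl (fun a op => a.insert op p.1) acc)
      (PySem.Dict.empty (κ := String) (ν := String)) =
    PySem.Dict.mk
      [("BINARY_OP", "Arithmetic"), ("UNARY_OP", "Arithmetic"),
       ("JUMP_FORWARD", "Control Flow"), ("JUMP_BACKWARD", "Control Flow"),
       ("POP_JUMP_FORWARD_IF_TRUE", "Control Flow"), ("POP_JUMP_FORWARD_IF_FALSE", "Control Flow"),
       ("POP_JUMP_BACKWARD_IF_TRUE", "Control Flow"), ("POP_JUMP_BACKWARD_IF_FALSE", "Control Flow"),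
       ("JUMP_IF_TRUE_OR_POP", "Control Flow"), ("JUMP_IF_FALSE_OR_POP", "Control Flow"),
       ("RETURN_VALUE", "Control Flow"),
       ("CALL", "Function Calls"), ("PRECALL", "Function Calls"),
       ("CALL_FUNCTION", "Function Calls"), ("CALL_METHOD", "Function Calls"),
       ("CALL_FUNCTION_KW", "Function Calls"), ("CALL_FUNCTION_EX", "Function Calls"),
       ("LOAD_FAST", "Load/Store"), ("STORE_FAST", "Load/Store"),
       ("LOAD_GLOBAL", "Load/Store"), ("STORE_GLOBAL", "Load/Store"),
       ("LOAD_CONST", "Load/Store"), ("LOAD_NAME", "Load/Store"),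
       ("STORE_NAME", "Load/Store"), ("LOAD_ATTR", "Load/Store"),
       ("STORE_ATTR", "Load/Store"), ("LOAD_DEREF", "Load/Store"),
       ("STORE_DEREF", "Load/Store")] := by decide

-- all opnames occurring in some category
def pvAllOps : List String :=
  ["BINARY_OP", "UNARY_OP", "JUMP_FORWARD", "JUMP_BACKWARD", "POP_JUMP_FORWARD_IF_TRUE",
   "POP_JUMP_FORWARD_IF_FALSE", "POP_JUMP_BACKWARD_IF_TRUE", "POP_JUMP_BACKWARD_IF_FALSE",
   "JUMP_IF_TRUE_OR_POP", "JUMP_IF_FALSE_OR_POP", "RETURN_VALUE", "CALL", "PRECALL",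
   "CALL_FUNCTION", "CALL_METHOD", "CALL_FUNCTION_KW", "CALL_FUNCTION_EX", "LOAD_FAST",
   "STORE_FAST", "LOAD_GLOBAL", "STORE_GLOBAL", "LOAD_CONST", "LOAD_NAME", "STORE_NAME",
   "LOAD_ATTR", "STORE_ATTR", "LOAD_DEREF", "STORE_DEREF"]

-- the two per-pair step functions agree
lemma pvStep_eq (d : PySem.Dict String Int) (op : String) (c : Int) :
    pvPlaceA d op c INSTRUCTION_CATEGORIES =
    d.modify ((INSTRUCTION_CATEGORIES.foldl
      (fun acc p => p.2.foldl (fun a o => a.insert o p.1) acc) PySem.Dict.empty).getD op "Other")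
      0 (· + c) := by
  rw [pvLookup_eval]
  by_cases h : op ∈ pvAllOps
  · simp only [pvAllOps, List.mem_cons, List.not_mem_nil, or_false] at h
    rcases h with rfl|rfl|rfl|rfl|rfl|rfl|rfl|rfl|rfl|rfl|rfl|rfl|rfl|rfl|rfl|rfl|rfl|rfl|rfl|rfl|rfl|rfl|rfl|rfl|rfl|rfl|rfl|rfl <;> rfl
  · simp only [pvAllOps, List.mem_cons, List.not_mem_nil, or_false, not_or] at h
    obtain ⟨h1,h2,h3,h4,h5,h6,h7,h8,h9,h10,h11,h12,h13,h14,h15,h16,h17,h18,h19,h20,h21,h22,h23,h24,h25,h26,h27,h28⟩ := h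
    have hget : (PySem.Dict.mk
      [("BINARY_OP", "Arithmetic"), ("UNARY_OP", "Arithmetic"),
       ("JUMP_FORWARD", "Control Flow"), ("JUMP_BACKWARD", "Control Flow"),
       ("POP_JUMP_FORWARD_IF_TRUE", "Control Flow"), ("POP_JUMP_FORWARD_IF_FALSE", "Control Flow"),
       ("POP_JUMP_BACKWARD_IF_TRUE", "Control Flow"), ("POP_JUMP_BACKWARD_IF_FALSE", "Control Flow"),
       ("JUMP_IF_TRUE_OR_POP", "Control Flow"), ("JUMP_IF_FALSE_OR_POP", "Control Flow"),
       ("RETURN_VALUE", "Control Flow"),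
       ("CALL", "Function Calls"), ("PRECALL", "Function Calls"),
       ("CALL_FUNCTION", "Function Calls"), ("CALL_METHOD", "Function Calls"),
       ("CALL_FUNCTION_KW", "Function Calls"), ("CALL_FUNCTION_EX", "Function Calls"),
       ("LOAD_FAST", "Load/Store"), ("STORE_FAST", "Load/Store"),
       ("LOAD_GLOBAL", "Load/Store"), ("STORE_GLOBAL", "Load/Store"),
       ("LOAD_CONST", "Load/Store"), ("LOAD_NAME", "Load/Store"),
       ("STORE_NAME", "Load/Store"), ("LOAD_ATTR", "Load/Store"),
       ("STORE_ATTR", "Load/Store"), ("LOAD_DEREF", "Load/Store"),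
       ("STORE_DEREF", "Load/Store")]).getD op "Other" = "Other" := by
      simp [PySem.Dict.getD_eq_get?_getD,
        Ne.symm h1, Ne.symm h2, Ne.symm h3, Ne.symm h4, Ne.symm h5, Ne.symm h6, Ne.symm h7,
        Ne.symm h8, Ne.symm h9, Ne.symm h10, Ne.symm h11, Ne.symm h12, Ne.symm h13, Ne.symm h14,
        Ne.symm h15, Ne.symm h16, Ne.symm h17, Ne.symm h18, Ne.symm h19, Ne.symm h20, Ne.symm h21,
        Ne.symm h22, Ne.symm h23, Ne.symm h24, Ne.symm h25, Ne.symm h26, Ne.symm h27, Ne.symm h28, PySem.Dict.get?]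
    rw [hget]
    simp [pvPlaceA, INSTRUCTION_CATEGORIES, List.contains_eq_mem,
      h1, h2, h3, h4, h5, h6, h7, h8, h9, h10, h11, h12, h13, h14,
      h15, h16, h17, h18, h19, h20, h21, h22, h23, h24, h25, h26, h27, h28]

-- ===== VERDICT (by name: the statement is the Claim_ definition above) =====
theorem categorize_instructions_spec : Claim_equal_categorize_instructions := by
  intro op_counts _
  unfold Spec_categorize_instructions categorize_instructions categorize_instructions_alt
  congr 1
  exact PySem.List.foldl_congr_mem _ _ _ _ (fun d p _ => pvStep_eq d p.1 p.2)
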